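-- pv_equiv track=rewrite | github.com/whm5815664/Django-dashboard | aiModels/graph/graph.py | find_vocab_mentions_positions
-- ===== SOURCE A (Python) =====
-- from typing import List, Dict, Tuple, Any, Optional
--
-- def find_vocab_mentions_positions(tokens: List[str], start: int, end: int,
--                                   vocab: List[str], normalize_map: Optional[Dict[str,str]]=None) -> List[Tuple[str,int,int]]:
--     end=min(end,len(tokens)-1); mentions=[]; vocab_set=set(vocab)
--     for i in range(start,end+1):
--         cur=""
--         for j in range(i,end+1):
--             cur+=tokens[j]
--             if cur in vocab_set:
--                 name = normalize_map.get(cur, cur) if normalize_map else cur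
--                 mentions.append((name,i,j))
--             if len(cur)>20: break
--     return mentions
-- ===== SOURCE B (Python) =====
-- def find_vocab_mentions_positions(tokens, start, end, vocab, normalize_map=None):
--     # Build a character-level trie of the vocab once; terminal nodes are marked
--     # under the key 0 (characters are the str keys, so 0 never collides).
--     TERM = 0
--     root = {}
--     for w in vocab:
--         node = root
--         for ch in w:
--             node = node.setdefault(ch, {})
--         node[TERM] = True
--     end = min(end, len(tokens) - 1)
--     mentions = []
--     for i in range(start, end + 1):
--         node = root
--         cur = ""
--         for j in range(i, end + 1):
--             for ch in tokens[j]: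
--                 node = node.get(ch)
--                 if node is None:
--                     break
--             cur += tokens[j]
--             if node is None:
--                 break  # cur is not a prefix of any vocab word: no longer span can match
--             if TERM in node:
--                 name = normalize_map.get(cur, cur) if normalize_map else cur
--                 mentions.append((name, i, j))
--             if len(cur) > 20:
--                 break
--     return mentions
-- ===== Notes on version B (the rewrite author's own statement) =====
-- stated objective: alternative
-- what changed: Replaces the per-span hash-set membership test by a character-level trie of the vocab built once up front; the inner span loop walks the trie and breaks as soon as the accumulated string stops being a prefix of any vocab word (prefix pruning), instead of blindly concatenating and testing every span up to the 20-char cap.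
import Mathlib
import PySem

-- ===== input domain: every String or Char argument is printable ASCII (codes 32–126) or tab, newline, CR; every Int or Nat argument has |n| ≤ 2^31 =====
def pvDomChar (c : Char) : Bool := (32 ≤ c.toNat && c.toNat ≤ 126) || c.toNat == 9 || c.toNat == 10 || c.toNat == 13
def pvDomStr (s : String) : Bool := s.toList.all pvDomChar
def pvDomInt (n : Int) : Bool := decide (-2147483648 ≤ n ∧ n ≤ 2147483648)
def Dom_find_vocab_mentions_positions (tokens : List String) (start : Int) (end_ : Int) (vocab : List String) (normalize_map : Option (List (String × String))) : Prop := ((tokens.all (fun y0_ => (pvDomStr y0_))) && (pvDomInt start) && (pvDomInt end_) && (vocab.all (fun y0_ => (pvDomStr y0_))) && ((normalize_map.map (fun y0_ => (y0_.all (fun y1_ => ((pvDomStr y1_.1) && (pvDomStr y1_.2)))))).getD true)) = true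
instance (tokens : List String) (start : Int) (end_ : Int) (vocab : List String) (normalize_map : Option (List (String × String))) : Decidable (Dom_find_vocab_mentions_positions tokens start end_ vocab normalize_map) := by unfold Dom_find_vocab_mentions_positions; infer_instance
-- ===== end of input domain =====

-- B replaces A's per-span set membership test by a character-level trie of the
-- vocab built once up front, letting the inner span loop stop as soon as the
-- accumulated string is no longer a prefix of any vocab word (prefix pruning);
-- the emitted mentions, their order and the 20-char cap are identical.

-- 'normalize_map.get(cur, cur) if normalize_map else cur' (both Pythons contain this
-- exact expression); dict.get is first-match lookup on the association list, and the
-- empty dict (falsy in Python) also yields the default cur, so the branches collapse.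
def pvNorm (normalize_map : Option (List (String × String))) (cur : String) : String :=
  match normalize_map with
  | some m => ((m.find? (fun p => p.1 == cur)).map Prod.snd).getD cur
  | none => cur

-- ===== PORT A =====
-- inner 'for j in range(i, end+1)' loop with its 'len(cur) > 20' break;
-- tokens[j]: Pre_ guarantees the index is in range, so pyGetD is exact here
def pvAInner (tokens : List String) (vs : PySem.Set String)
    (nm : Option (List (String × String))) (i : Int) :
    String → List Int → List (String × Int × Int) → List (String × Int × Int)
  | _, [], acc => acc
  | cur, j :: js, acc =>
    let cur' := cur ++ PySem.List.pyGetD tokens j ""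
    let acc' := if PySem.Set.contains vs cur' then acc ++ [(pvNorm nm cur', i, j)] else acc
    if PySem.Str.len cur' > 20 then acc' else pvAInner tokens vs nm i cur' js acc'

def find_vocab_mentions_positions (tokens : List String) (start : Int) (end_ : Int) (vocab : List String) (normalize_map : Option (List (String × String))) : List (String × Int × Int) :=
  let end' := min end_ ((tokens.length : Int) - 1)
  let vocab_set := PySem.Set.ofList vocab
  (PySem.List.pyRange start (end' + 1) 1).foldl
    (fun acc i =>
      pvAInner tokens vocab_set normalize_map i "" (PySem.List.pyRange i (end' + 1) 1) acc)
    []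

-- ===== PORT B =====
-- trie node: terminal flag + children (explicit child-list type, no nested inductive)
mutual
inductive PvTrie : Type
  | node : Bool → PvKids → PvTrie
inductive PvKids : Type
  | nil : PvKids
  | cons : Char → PvTrie → PvKids → PvKids
end

-- node.get(ch)
def pvKidsGet : PvKids → Char → Option PvTrie
  | .nil, _ => none
  | .cons c t r, d => if d = c then some t else pvKidsGet r d

-- write/overwrite one child (dict setdefault's insertion: new keys append at the end)
def pvKidsSet : PvKids → Char → PvTrie → PvKids
  | .nil, c, u => .cons c u .nil
  | .cons k t r, c, u => if k = c then .cons c u r else .cons k t (pvKidsSet r c u)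

-- insert one word: walk/extend the path (setdefault), mark the last node terminal
def pvTrieInsert : PvTrie → List Char → PvTrie
  | .node _ ks, [] => .node true ks
  | .node b ks, c :: cs =>
    .node b (pvKidsSet ks c (pvTrieInsert ((pvKidsGet ks c).getD (.node false .nil)) cs))

-- the 'for w in vocab' build loop
def pvBuild (vocab : List String) : PvTrie :=
  vocab.foldl (fun t w => pvTrieInsert t w.toList) (.node false .nil)

-- the 'for ch in tokens[j]' descent loop with its break (none stays none)
def pvStep : Option PvTrie → List Char → Option PvTrie
  | o, [] => o
  | none, _ :: _ => none
  | some (.node _ ks), c :: cs => pvStep (pvKidsGet ks c) cs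

def pvTerm : Option PvTrie → Bool
  | none => false
  | some (.node b _) => b

-- inner 'for j in range(i, end+1)' loop carrying the current trie node;
-- breaks when the path leaves the trie, and keeps the 'len(cur) > 20' break
def pvBInner (tokens : List String) (nm : Option (List (String × String))) (i : Int) :
    Option PvTrie → String → List Int → List (String × Int × Int) → List (String × Int × Int)
  | _, _, [], acc => acc
  | node, cur, j :: js, acc =>
    let tok := PySem.List.pyGetD tokens j ""
    let node' := pvStep node tok.toList
    let cur' := cur ++ tok
    match node' with
    | none => acc
    | some t =>
      let acc' := if pvTerm (some t) then acc ++ [(pvNorm nm cur', i, j)] else acc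
      if PySem.Str.len cur' > 20 then acc' else pvBInner tokens nm i (some t) cur' js acc'

def find_vocab_mentions_positions_alt (tokens : List String) (start : Int) (end_ : Int) (vocab : List String) (normalize_map : Option (List (String × String))) : List (String × Int × Int) :=
  let root := pvBuild vocab
  let end' := min end_ ((tokens.length : Int) - 1)
  (PySem.List.pyRange start (end' + 1) 1).foldl
    (fun acc i =>
      pvBInner tokens normalize_map i (some root) "" (PySem.List.pyRange i (end' + 1) 1) acc)
    []

-- ===== PRECONDITION & SPEC =====
-- Pre_ excludes exactly the inputs where Python A raises IndexError: a nonempty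
-- i/j-range starting below -len(tokens) (the first tokens[start] access raises).
def Pre_find_vocab_mentions_positions (tokens : List String) (start : Int) (end_ : Int) (vocab : List String) (normalize_map : Option (List (String × String))) : Prop :=
  -(tokens.length : Int) ≤ start ∨ start > min end_ ((tokens.length : Int) - 1)
instance (tokens : List String) (start : Int) (end_ : Int) (vocab : List String) (normalize_map : Option (List (String × String))) : Decidable (Pre_find_vocab_mentions_positions tokens start end_ vocab normalize_map) := by unfold Pre_find_vocab_mentions_positions; infer_instance

def pvWitness_find_vocab_mentions_positions : List String × Int × Int × List String × (Option (List (String × String))) :=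
  (["ab", "c"], 0, 1, ["ab", "abc"], none)

def Spec_find_vocab_mentions_positions (tokens : List String) (start : Int) (end_ : Int) (vocab : List String) (normalize_map : Option (List (String × String))) (out : List (String × Int × Int)) : Prop := out = find_vocab_mentions_positions_alt tokens start end_ vocab normalize_map
instance (tokens : List String) (start : Int) (end_ : Int) (vocab : List String) (normalize_map : Option (List (String × String))) (out : List (String × Int × Int)) : Decidable (Spec_find_vocab_mentions_positions tokens start end_ vocab normalize_map out) := by unfold Spec_find_vocab_mentions_positions; infer_instance

-- ===== CLAIM (what is proved, stated in full; the proofs are below) =====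
def Claim_equal_find_vocab_mentions_positions : Prop := ∀ (tokens : List String) (start : Int) (end_ : Int) (vocab : List String) (normalize_map : Option (List (String × String))), Dom_find_vocab_mentions_positions tokens start end_ vocab normalize_map → Pre_find_vocab_mentions_positions tokens start end_ vocab normalize_map → Spec_find_vocab_mentions_positions tokens start end_ vocab normalize_map (find_vocab_mentions_positions tokens start end_ vocab normalize_map)

-- ===== LEMMAS AND PROOFS =====

theorem pvStep_none (cs : List Char) : pvStep none cs = none := by
  cases cs <;> rfl

theorem pvStep_append (p q : List Char) (o : Option PvTrie) :
    pvStep o (p ++ q) = pvStep (pvStep o p) q := by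
  induction p generalizing o with
  | nil => rfl
  | cons c p ih =>
    cases o with
    | none => simp [pvStep_none, pvStep]
    | some t => cases t with | node b ks => simp [pvStep, ih]

theorem pvKidsGet_set : ∀ (ks : PvKids) (c d : Char) (u : PvTrie),
    pvKidsGet (pvKidsSet ks c u) d = if d = c then some u else pvKidsGet ks d
  | .nil, c, d, u => by simp [pvKidsSet, pvKidsGet]
  | .cons k t r, c, d, u => by
    by_cases hkc : k = c
    · subst hkc
      by_cases hd : d = k <;> simp [pvKidsSet, pvKidsGet, hd]
    · by_cases hd : d = k
      · subst hd; simp [pvKidsSet, pvKidsGet, hkc]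
      · simp [pvKidsSet, pvKidsGet, hkc, hd, pvKidsGet_set r c d u]

theorem pvTerm_none : pvTerm none = false := rfl

theorem pvTerm_empty (s : List Char) :
    pvTerm (pvStep (some (.node false .nil)) s) = false := by
  cases s with
  | nil => rfl
  | cons c cs => simp [pvStep, pvKidsGet, pvStep_none, pvTerm]

theorem pvTerm_insert (w : List Char) (t : PvTrie) (s : List Char) :
    pvTerm (pvStep (some (pvTrieInsert t w)) s)
      = (pvTerm (pvStep (some t) s) || decide (s = w)) := by
  induction w generalizing t s with
  | nil =>
    cases t with | node b ks =>
    cases s with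
    | nil => simp [pvTrieInsert, pvStep, pvTerm]
    | cons d ds => simp [pvTrieInsert, pvStep, pvTerm]
  | cons c cs ih =>
    cases t with | node b ks =>
    cases s with
    | nil => simp [pvTrieInsert, pvStep, pvTerm]
    | cons d ds =>
      by_cases hdc : d = c
      · subst hdc
        cases hg : pvKidsGet ks d with
        | none =>
          have h2 := ih (PvTrie.node false PvKids.nil) ds
          simp [pvTrieInsert, pvStep, pvKidsGet_set, hg, pvStep_none, pvTerm_none, h2,
            pvTerm_empty]
        | some t0 =>
          simp [pvTrieInsert, pvStep, pvKidsGet_set, hg, ih]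
      · simp [pvTrieInsert, pvStep, pvKidsGet_set, hdc]

theorem pvTerm_build_aux (vocab : List String) (t : PvTrie) (s : List Char) :
    pvTerm (pvStep (some (vocab.foldl (fun t w => pvTrieInsert t w.toList) t)) s)
      = (pvTerm (pvStep (some t) s) || vocab.any (fun w => decide (s = w.toList))) := by
  induction vocab generalizing t with
  | nil => simp
  | cons v vs ih =>
    simp [List.foldl_cons, ih, pvTerm_insert, Bool.or_assoc]

theorem pvAny_eq_mem (vocab : List String) (cur : String) :
    (vocab.any (fun w => decide (cur.toList = w.toList))) = decide (cur ∈ vocab) := by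
  induction vocab with
  | nil => simp
  | cons v vs ih =>
    have ih' : (vs.any fun w => decide (cur = w)) = decide (cur ∈ vs) := by
      simpa [String.toList_inj] using ih
    simp only [List.any_cons, String.toList_inj, List.mem_cons]
    by_cases h : cur = v <;> simp [h, ih']

-- A's set-membership test computes exactly B's "current trie node is terminal"
theorem pvContains_eq_term (vocab : List String) (cur : String) :
    PySem.Set.contains (PySem.Set.ofList vocab) cur
      = pvTerm (pvStep (some (pvBuild vocab)) cur.toList) := by
  have h1 : PySem.Set.contains (PySem.Set.ofList vocab) cur = decide (cur ∈ vocab) := by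
    by_cases h : cur ∈ vocab
    · simp [h, (PySem.Set.contains_iff _ _).mpr ((PySem.Set.mem_ofList _ _).mpr h)]
    · simp only [h, decide_false]
      by_contra hc
      exact h ((PySem.Set.mem_ofList _ _).mp ((PySem.Set.contains_iff _ _).mp
        (Bool.of_not_eq_false hc)))
  rw [h1, pvBuild, pvTerm_build_aux, pvTerm_empty, Bool.false_or, pvAny_eq_mem]

-- once the accumulated string has left the trie, A's remaining inner iterations emit nothing
theorem pvAInner_dead (tokens : List String) (vocab : List String)
    (nm : Option (List (String × String))) (i : Int) (cur : String)
    (js : List Int) (acc : List (String × Int × Int))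
    (h : pvStep (some (pvBuild vocab)) cur.toList = none) :
    pvAInner tokens (PySem.Set.ofList vocab) nm i cur js acc = acc := by
  induction js generalizing cur acc with
  | nil => rfl
  | cons j js ih =>
    have hcur' : pvStep (some (pvBuild vocab))
        (cur ++ PySem.List.pyGetD tokens j "").toList = none := by
      rw [String.toList_append, pvStep_append, h, pvStep_none]
    have hc : PySem.Set.contains (PySem.Set.ofList vocab)
        (cur ++ PySem.List.pyGetD tokens j "") = false := by
      rw [pvContains_eq_term, hcur', pvTerm]
    simp only [pvAInner, hc, Bool.false_eq_true, if_false]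
    split
    · rfl
    · exact ih _ _ hcur'

-- main inner-loop correspondence: B carries the trie node A implicitly denotes
theorem pvInner_eq (tokens : List String) (vocab : List String)
    (nm : Option (List (String × String))) (i : Int) (js : List Int)
    (cur : String) (acc : List (String × Int × Int)) :
    pvAInner tokens (PySem.Set.ofList vocab) nm i cur js acc
      = pvBInner tokens nm i (pvStep (some (pvBuild vocab)) cur.toList) cur js acc := by
  induction js generalizing cur acc with
  | nil => rfl
  | cons j js ih =>
    set tok := PySem.List.pyGetD tokens j "" with htok
    have hstep : pvStep (pvStep (some (pvBuild vocab)) cur.toList) tok.toList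
        = pvStep (some (pvBuild vocab)) (cur ++ tok).toList := by
      rw [String.toList_append, pvStep_append]
    cases hn : pvStep (some (pvBuild vocab)) (cur ++ tok).toList with
    | none =>
      have hc : PySem.Set.contains (PySem.Set.ofList vocab) (cur ++ tok) = false := by
        rw [pvContains_eq_term, hn, pvTerm]
      simp only [pvAInner, pvBInner, ← htok, hstep, hn, hc, Bool.false_eq_true, if_false]
      split
      · rfl
      · exact pvAInner_dead tokens vocab nm i _ js acc hn
    | some t =>
      have hc : PySem.Set.contains (PySem.Set.ofList vocab) (cur ++ tok)
          = pvTerm (some t) := by rw [pvContains_eq_term, hn]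
      simp only [pvAInner, pvBInner, ← htok, hstep, hn, hc]
      split
      · rfl
      · rw [ih, hn]

-- ===== VERDICT (by name: the statement is the Claim_ definition above) =====
theorem find_vocab_mentions_positions_spec : Claim_equal_find_vocab_mentions_positions := by
  intro tokens start end_ vocab normalize_map _ _
  show (PySem.List.pyRange start (min end_ ((tokens.length : Int) - 1) + 1) 1).foldl
      (fun acc i => pvAInner tokens (PySem.Set.ofList vocab) normalize_map i ""
        (PySem.List.pyRange i (min end_ ((tokens.length : Int) - 1) + 1) 1) acc) []
    = (PySem.List.pyRange start (min end_ ((tokens.length : Int) - 1) + 1) 1).foldl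
      (fun acc i => pvBInner tokens normalize_map i (some (pvBuild vocab)) ""
        (PySem.List.pyRange i (min end_ ((tokens.length : Int) - 1) + 1) 1) acc) []
  congr 1
  funext acc i
  simpa using pvInner_eq tokens vocab normalize_map i
    (PySem.List.pyRange i (min end_ ((tokens.length : Int) - 1) + 1) 1) "" acc
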